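-- pv_equiv track=rewrite | github.com/ehiber/interview-coding-challenge | exercises/07-reduce-gifts/solution.hide.py | reduce_gifts
-- ===== SOURCE A (Python) =====
-- def reduce_gifts(prices=[], k=3, threshold=14):
--     """
--     Hidden solution: iteratively remove the largest element from the first
--     k-window (in the current array) that exceeds the threshold until all
--     k-windows have sum <= threshold. Returns the number of removed items.
--     This is a straightforward (but not optimal for huge inputs) approach
--     useful for testing and demonstration.
--     """
--     if prices is None:
--         prices = []
--     arr = list(prices)
--     removed = 0
--
--     # Edge cases
--     if k <= 0:
--         return 0
--
--     # Keep removing until no window of size k exceeds threshold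
--     while True:
--         n = len(arr)
--         if n < k:
--             break
--
--         found = False
--         for i in range(0, n - k + 1):
--             window = arr[i:i+k]
--             s = sum(window)
--             if s > threshold:
--                 # remove the largest element in this window
--                 max_val = max(window)
--                 idx = i + window.index(max_val)
--                 arr.pop(idx)
--                 removed += 1
--                 found = True
--                 break
--
--         if not found:
--             break
--
--     return removed
-- ===== SOURCE B (Python) =====
-- def reduce_gifts(prices=[], k=3, threshold=14):
--     if prices is None:
--         prices = []
--     if k <= 0:
--         return 0
--     removed = 0
--     # Zipper scan: `rest` is the unprocessed suffix.  Once the leading window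
--     # rest[:k] is within the threshold its head can never again be part of an
--     # over-threshold window (removals only shrink later windows), so it is
--     # dropped for good; otherwise the first maximum of the window is removed
--     # and the same position is rechecked.  No restart from index 0.
--     rest = list(prices)
--     while len(rest) >= k:
--         w = rest[:k]
--         if sum(w) > threshold:
--             w.remove(max(w))
--             rest = w + rest[k:]
--             removed += 1
--         else:
--             rest = rest[1:]
--     return removed
-- ===== Notes on version B (the rewrite author's own statement) =====
-- stated objective: faster
-- what changed: B replaces A's restart-from-zero window scan (index loop over the whole array after every removal) by a single zipper pass over the unprocessed suffix: a cleared window head is dropped for good and an over-threshold window loses its first maximum in place, so no index arithmetic and no rescan.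
import Mathlib
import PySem

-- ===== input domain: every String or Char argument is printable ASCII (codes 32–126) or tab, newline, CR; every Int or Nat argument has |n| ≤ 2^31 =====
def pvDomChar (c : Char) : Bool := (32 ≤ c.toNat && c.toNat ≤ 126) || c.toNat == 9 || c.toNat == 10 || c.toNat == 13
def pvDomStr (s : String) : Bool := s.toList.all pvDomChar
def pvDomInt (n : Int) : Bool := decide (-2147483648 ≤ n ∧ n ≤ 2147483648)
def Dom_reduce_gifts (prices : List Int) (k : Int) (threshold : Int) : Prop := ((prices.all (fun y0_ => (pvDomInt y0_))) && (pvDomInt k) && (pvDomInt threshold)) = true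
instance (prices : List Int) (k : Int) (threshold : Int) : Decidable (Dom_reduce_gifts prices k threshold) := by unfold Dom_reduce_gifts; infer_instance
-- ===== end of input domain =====

-- B replaces A's restart-from-zero window scan by a single zipper pass over the
-- unprocessed suffix (cleared heads are dropped for good); removals only shrink
-- later windows, so the two programs count the same removals.

-- ===== PORT A =====
-- A, transliterated. The inner `for i in range(0, n-k+1)` scan (aScan: returns the array
-- after the first removal, or none when no window exceeds the threshold) inside the outer
-- `while True` loop (aLoop), restarted from index 0 after every removal. `fuel` is only a
-- structural-recursion totality guard; the callers pass enough for it never to run out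
-- (the scan visits at most n-k+1 ≤ n+1 indices; the outer loop removes one element per
-- iteration, so at most n+1 iterations). The window arr[i:i+k] is nonempty whenever the
-- scan reaches it (1 ≤ k and i+k ≤ n), so Python's max()/.index()/.pop() succeed; their
-- PySem ports return some there, with .getD supplying an unreachable default.
def aScan (k th : Int) (arr : List Int) (fuel i : Nat) : Option (List Int) :=
  match fuel with
  | 0 => none
  | fuel + 1 =>
    if i < arr.length + 1 - k.toNat then
      if (PySem.List.slice arr (some (i:Int)) (some ((i:Int) + k))).sum > th then
        some (((PySem.List.pop? arr ((i:Int) +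
          (((PySem.List.index? (PySem.List.slice arr (some (i:Int)) (some ((i:Int) + k)))
            ((PySem.List.max? (PySem.List.slice arr (some (i:Int)) (some ((i:Int) + k))) (fun x => x)).getD 0)).getD 0 : Nat) : Int))).getD (0, arr)).2)
      else aScan k th arr fuel (i+1)
    else none

def aLoop (k th : Int) (fuel : Nat) (arr : List Int) (removed : Int) : Int :=
  match fuel with
  | 0 => removed
  | fuel + 1 =>
    if (arr.length : Int) < k then removed
    else
      match aScan k th arr (arr.length + 1) 0 with
      | some arr' => aLoop k th fuel arr' (removed + 1)
      | none => removed

def reduce_gifts (prices : List Int) (k : Int) (threshold : Int) : Int :=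
  if k ≤ 0 then 0
  else aLoop k threshold (prices.length + 1) prices 0

-- ===== PORT B =====
-- B, transliterated: a zipper over the unprocessed suffix `rest`. The loop body
-- takes the leading window w = rest[:k]; if its sum exceeds the threshold,
-- `w.remove(max(w))` deletes the first maximum (PySem.List.remove? of the
-- PySem.List.max?; both succeed since w is nonempty there, `.getD` is an
-- unreachable default) and the shortened window is glued back onto rest[k:];
-- otherwise the head rest[1:] is dropped for good. `fuel` is only a totality
-- guard: every iteration shortens rest by one element, so len(rest)+1 suffices.
def bZip (k th : Int) (fuel : Nat) (rest : List Int) (removed : Int) : Int :=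
  match fuel with
  | 0 => removed
  | fuel + 1 =>
    if k ≤ (rest.length : Int) then
      if (rest.take k.toNat).sum > th then
        bZip k th fuel
          (((PySem.List.remove? (rest.take k.toNat)
              ((PySem.List.max? (rest.take k.toNat) (fun x => x)).getD 0)).getD [])
            ++ rest.drop k.toNat)
          (removed + 1)
      else bZip k th fuel (rest.drop 1) removed
    else removed

def reduce_gifts_alt (prices : List Int) (k : Int) (threshold : Int) : Int :=
  if k ≤ 0 then 0
  else bZip k threshold (prices.length + 1) prices 0

-- ===== PRECONDITION & SPEC =====
def Spec_reduce_gifts (prices : List Int) (k : Int) (threshold : Int) (out : Int) : Prop := out = reduce_gifts_alt prices k threshold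
instance (prices : List Int) (k : Int) (threshold : Int) (out : Int) : Decidable (Spec_reduce_gifts prices k threshold out) := by unfold Spec_reduce_gifts; infer_instance

-- ===== CLAIM (what is proved, stated in full; the proofs are below) =====
def Claim_equal_reduce_gifts : Prop := ∀ (prices : List Int) (k : Int) (threshold : Int), Dom_reduce_gifts prices k threshold → Spec_reduce_gifts prices k threshold (reduce_gifts prices k threshold)

-- ===== LEMMAS AND PROOFS =====

lemma pv_slice_win (arr : List Int) (i : Nat) (k : Int) (hk : 0 ≤ k) :
    PySem.List.slice arr (some (i:Int)) (some ((i:Int) + k)) = (arr.drop i).take k.toNat := by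
  have h : (i:Int) + k = (i:Int) + ((k.toNat : Nat) : Int) := by omega
  rw [h, PySem.List.slice_natCast_add]

-- The nonempty window arr[i:i+k] has a first maximum m at offset j, an actual element.
lemma pv_window_facts (arr : List Int) (i kn : Nat) (hkn : 1 ≤ kn) (hlen : i + kn ≤ arr.length) :
    ∃ m j, PySem.List.max? ((arr.drop i).take kn) (fun x => x) = some m ∧
      PySem.List.index? ((arr.drop i).take kn) m = some j ∧ j < kn ∧
      ∃ hij : i + j < arr.length, arr[i+j] = m := by
  have hwl : ((arr.drop i).take kn).length = kn := by
    simp [List.length_take, List.length_drop]; omega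
  have hne : (arr.drop i).take kn ≠ [] := by
    intro h; rw [h] at hwl; simp at hwl; omega
  obtain ⟨m, hm⟩ : ∃ m, PySem.List.max? ((arr.drop i).take kn) (fun x => x) = some m := by
    cases hmx : PySem.List.max? ((arr.drop i).take kn) (fun x => x) with
    | none => exact absurd ((PySem.List.max?_eq_none_iff _ _).mp hmx) hne
    | some m => exact ⟨m, rfl⟩
  have hmem : m ∈ (arr.drop i).take kn := PySem.List.max?_mem hm
  obtain ⟨j, hj⟩ : ∃ j, PySem.List.index? ((arr.drop i).take kn) m = some j := by
    cases hix : PySem.List.index? ((arr.drop i).take kn) m with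
    | none =>
      have := (PySem.List.index?_isSome_iff _ _).mpr hmem
      rw [hix] at this; simp at this
    | some j => exact ⟨j, rfl⟩
  obtain ⟨hjl, hjv, -⟩ := PySem.List.getElem_of_index?_eq_some hj
  have hjkn : j < kn := by omega
  have hij : i + j < arr.length := by omega
  refine ⟨m, j, hm, hj, hjkn, hij, ?_⟩
  rw [← hjv]; simp [List.getElem_take, List.getElem_drop]

-- Python's w.remove(max(w)) deletes exactly the element w.index(max(w)) points at.
lemma pv_remove_eq_eraseIdx (w : List Int) (m : Int) (j : Nat)
    (hj : PySem.List.index? w m = some j) :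
    PySem.List.remove? w m = some (w.eraseIdx j) := by
  have hmem : m ∈ w := (PySem.List.index?_isSome_iff _ _).mp (by rw [hj]; rfl)
  rw [PySem.List.remove?_eq_some_erase w m hmem, ← List.eraseIdx_idxOf_eq_erase]
  rw [PySem.List.index?_eq_idxOf?] at hj
  rw [List.idxOf_eq_getD_idxOf?, hj]
  rfl

-- `pvClean th kn arr i`: every window of size kn starting strictly left of i is within threshold.
def pvClean (th : Int) (kn : Nat) (arr : List Int) (i : Nat) : Prop :=
  ∀ t, t < i → t + kn ≤ arr.length → ((arr.drop t).take kn).sum ≤ th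

-- Sum of a window that crossed the erased index: one element out, the next element in.
lemma pv_wsum_erase (arr : List Int) (t kn idx : Nat) (h1 : t ≤ idx) (h2 : idx < t + kn)
    (h3 : t + kn < arr.length) :
    (((arr.eraseIdx idx).drop t).take kn).sum
      = ((arr.drop t).take kn).sum - arr[idx]'(by omega) + arr[t+kn]'h3 := by
  have hidx : idx < arr.length := by omega
  set q := kn - (idx - t) with hq
  have hq1 : 1 ≤ q := by omega
  have hkn : kn = (idx - t) + q := by omega
  have hL : ((arr.eraseIdx idx).drop t).take kn
      = (arr.drop t).take (idx - t) ++ (arr.drop (idx+1)).take q := by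
    rw [List.eraseIdx_eq_take_drop_succ, List.drop_append, List.take_append, List.drop_take]
    have hlt : (arr.take idx).length = idx := by simp; omega
    have ht0 : t - (arr.take idx).length = 0 := by omega
    have hlen2 : ((arr.drop t).take (idx - t)).length = idx - t := by
      simp [List.length_take, List.length_drop]; omega
    rw [ht0, hlen2, List.take_take]
    have e1 : min kn (idx - t) = idx - t := by omega
    have e2 : kn - (idx - t) = q := by omega
    rw [e1, e2, List.drop_zero]
  have hR : (arr.drop t).take kn
      = (arr.drop t).take (idx - t) ++ (arr[idx]'hidx :: (arr.drop (idx+1)).take (q-1)) := by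
    conv_lhs => rw [hkn]
    rw [List.take_add, List.drop_drop]
    have hdt : t + (idx - t) = idx := by omega
    rw [hdt, List.drop_eq_getElem_cons hidx]
    have hq' : q = (q-1) + 1 := by omega
    conv_lhs => rw [hq']
    rw [List.take_succ_cons]
  have hE : (arr.drop (idx+1)).take q = (arr.drop (idx+1)).take (q-1) ++ [arr[t+kn]'h3] := by
    have hq' : q = (q-1) + 1 := by omega
    rw [hq', List.take_add_one]
    have : (arr.drop (idx+1))[q-1]? = some (arr[t+kn]'h3) := by
      rw [List.getElem?_drop]
      have : idx + 1 + (q - 1) = t + kn := by omega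
      rw [this, List.getElem?_eq_getElem h3]
    rw [this]; rfl
  rw [hL, hE, hR]
  simp [List.sum_append]
  ring

-- Erasing the first max of the violating window at i keeps all windows left of i within threshold.
lemma pv_clean_erase (th : Int) (kn i j : Nat) (arr : List Int) (m : Int)
    (hkn : 1 ≤ kn) (hik : i + kn ≤ arr.length)
    (hcl : pvClean th kn arr i)
    (hm : PySem.List.max? ((arr.drop i).take kn) (fun x => x) = some m)
    (hj : PySem.List.index? ((arr.drop i).take kn) m = some j) :
    pvClean th kn (arr.eraseIdx (i+j)) i := by
  obtain ⟨hjl, hjv, -⟩ := PySem.List.getElem_of_index?_eq_some hj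
  have hwl : ((arr.drop i).take kn).length = kn := by
    simp [List.length_take, List.length_drop]; omega
  have hjkn : j < kn := by omega
  have hidx : i + j < arr.length := by omega
  have hlen : (arr.eraseIdx (i+j)).length = arr.length - 1 := by
    rw [List.length_eraseIdx]; simp [hidx]
  intro t ht hlen'
  rw [hlen] at hlen'
  by_cases hc : t + kn ≤ i + j
  · have heq : ((arr.eraseIdx (i+j)).drop t).take kn = (arr.drop t).take kn := by
      have hl1 : (((arr.eraseIdx (i+j)).drop t).take kn).length = kn := by
        simp [List.length_take, List.length_drop, hlen]; omega
      have hl2 : ((arr.drop t).take kn).length = kn := by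
        simp [List.length_take, List.length_drop]; omega
      apply List.ext_getElem (by rw [hl1, hl2])
      intro s hs1 hs2
      rw [hl1] at hs1
      simp only [List.getElem_take, List.getElem_drop]
      exact List.getElem_eraseIdx_of_lt (by rw [hlen]; omega) (by omega)
    rw [heq]
    exact hcl t ht (by omega)
  · have h1 : t ≤ i + j := by omega
    have h2 : i + j < t + kn := by omega
    have h3 : t + kn < arr.length := by omega
    rw [pv_wsum_erase arr t kn (i+j) h1 h2 h3]
    have hvm : arr[i+j]'hidx = m := by
      rw [← hjv]; simp [List.getElem_take, List.getElem_drop]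
    have hmem : arr[t+kn]'h3 ∈ (arr.drop i).take kn := by
      have hs : t + kn - i < kn := by omega
      have : ((arr.drop i).take kn)[t+kn-i]'(by omega) = arr[t+kn]'h3 := by
        simp only [List.getElem_take, List.getElem_drop]
        congr 1; omega
      rw [← this]; exact List.getElem_mem _
    have hle : arr[t+kn]'h3 ≤ m := PySem.List.max?_isMax hm _ hmem
    have hold : ((arr.drop t).take kn).sum ≤ th := hcl t ht (by omega)
    omega

-- A's scan returns none when every valid window is within threshold.
lemma aScan_eq_none (k th : Int) (arr : List Int)
    (hall : ∀ t, t < arr.length + 1 - k.toNat → t + k.toNat ≤ arr.length →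
      ((arr.drop t).take k.toNat).sum ≤ th) (hk : 0 ≤ k) :
    ∀ (f i : Nat), aScan k th arr f i = none := by
  intro f
  induction f with
  | zero => intro i; rfl
  | succ f ih =>
    intro i
    rw [aScan]
    by_cases hg : i < arr.length + 1 - k.toNat
    · rw [if_pos hg, pv_slice_win arr i k hk,
        if_neg (by exact not_lt.mpr (hall i hg (by omega)))]
      exact ih (i+1)
    · rw [if_neg hg]

-- A's scan, started anywhere left of the first violating window i, removes the first max of
-- window i (the windows in between are within threshold, so the scan passes over them).
lemma aScan_finds (k th : Int) (hk : 1 ≤ k) (arr : List Int) (i : Nat) (m : Int) (j : Nat)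
    (hlen : i + k.toNat ≤ arr.length)
    (hs : ((arr.drop i).take k.toNat).sum > th)
    (hm : PySem.List.max? ((arr.drop i).take k.toNat) (fun x => x) = some m)
    (hj : PySem.List.index? ((arr.drop i).take k.toNat) m = some j)
    (hij : i + j < arr.length) :
    ∀ (d f p : Nat), i = p + d → arr.length + 1 - k.toNat - p ≤ f →
      (∀ t, p ≤ t → t < i → ((arr.drop t).take k.toNat).sum ≤ th) →
      aScan k th arr f p = some (arr.eraseIdx (i+j)) := by
  intro d
  induction d with
  | zero =>
    intro f p hp hf _
    have hpi : p = i := by omega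
    subst hpi
    obtain ⟨f, rfl⟩ : ∃ f', f = f' + 1 := ⟨f - 1, by omega⟩
    rw [aScan, if_pos (by omega), pv_slice_win arr p k (by omega), if_pos hs, hm]
    simp only [Option.getD_some]
    rw [hj]
    simp only [Option.getD_some]
    have hcast : (p:Int) + ((j:Nat):Int) = (((p+j : Nat)):Int) := by push_cast; ring
    rw [hcast, PySem.List.pop?_natCast arr (p+j) hij]
    simp only [Option.getD_some]
  | succ d ih =>
    intro f p hp hf hcl
    obtain ⟨f, rfl⟩ : ∃ f', f = f' + 1 := ⟨f - 1, by omega⟩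
    rw [aScan, if_pos (by omega), pv_slice_win arr p k (by omega),
      if_neg (by exact not_lt.mpr (hcl p (le_refl p) (by omega)))]
    exact ih f (p+1) (by omega) (by omega) (fun t ht1 ht2 => hcl t (by omega) ht2)

-- Main bisimulation: A's restarting loop on pre ++ rest, with every window starting inside
-- pre within threshold, computes the same count as B's zipper resumed on rest.
lemma pv_main (k th : Int) (hk : 1 ≤ k) :
    ∀ (fb fa : Nat) (pre rest : List Int) (removed : Int),
      (pre ++ rest).length + 1 ≤ fa → rest.length + 1 ≤ fb →
      pvClean th k.toNat (pre ++ rest) pre.length →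
      aLoop k th fa (pre ++ rest) removed = bZip k th fb rest removed := by
  intro fb
  induction fb with
  | zero => intro fa pre rest removed hfa hfb hcl; omega
  | succ fb ih =>
    intro fa pre rest removed hfa hfb hcl
    obtain ⟨fa, rfl⟩ : ∃ f', fa = f' + 1 := ⟨fa - 1, by omega⟩
    have hdw : ((pre ++ rest).drop pre.length) = rest := List.drop_left
    by_cases hg : k ≤ (rest.length : Int)
    · have hlen : pre.length + k.toNat ≤ (pre ++ rest).length := by
        simp [List.length_append]; omega
      have hnk : ¬ (((pre ++ rest).length : Int) < k) := by
        simp [List.length_append]; omega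
      by_cases hs : (rest.take k.toNat).sum > th
      · -- both remove the first max of the leading window of rest
        obtain ⟨m, j, hm, hj, hjkn, hij, -⟩ :=
          pv_window_facts (pre ++ rest) pre.length k.toNat (by omega) hlen
        rw [hdw] at hm hj
        have hA : aScan k th (pre ++ rest) ((pre ++ rest).length + 1) 0
            = some ((pre ++ rest).eraseIdx (pre.length + j)) :=
          aScan_finds k th hk (pre ++ rest) pre.length m j hlen (by rw [hdw]; exact hs)
            (by rw [hdw]; exact hm) (by rw [hdw]; exact hj) hij pre.length
            ((pre ++ rest).length + 1) 0 (by omega) (by omega)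
            (fun t _ ht2 => hcl t ht2 (by omega))
        have herase : (pre ++ rest).eraseIdx (pre.length + j)
            = pre ++ ((rest.take k.toNat).eraseIdx j ++ rest.drop k.toNat) := by
          rw [List.eraseIdx_append_of_length_le (by omega)]
          have e0 : pre.length + j - pre.length = j := by omega
          rw [e0]
          congr 1
          conv_lhs => rw [← List.take_append_drop k.toNat rest]
          rw [List.eraseIdx_append_of_lt_length
            (by simp [List.length_take]; omega)]
        rw [aLoop, if_neg hnk, hA, bZip, if_pos hg, if_pos hs, hm]
        simp only [Option.getD_some]
        rw [pv_remove_eq_eraseIdx (rest.take k.toNat) m j hj]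
        simp only [Option.getD_some]
        rw [herase]
        have htl : (rest.take k.toNat).length = k.toNat := by
          simp [List.length_take]; omega
        have hrl' : ((rest.take k.toNat).eraseIdx j ++ rest.drop k.toNat).length
            = rest.length - 1 := by
          rw [List.length_append, List.length_eraseIdx, htl, if_pos hjkn, List.length_drop]
          omega
        have hfa' : pre.length + rest.length + 1 ≤ fa + 1 := by
          rw [List.length_append] at hfa; exact hfa
        apply ih fa pre _ (removed + 1)
        · rw [List.length_append, hrl']
          omega
        · rw [hrl']
          omega
        · have := pv_clean_erase th k.toNat pre.length j (pre ++ rest) m (by omega) hlen hcl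
            (by rw [hdw]; exact hm) (by rw [hdw]; exact hj)
          rw [herase] at this
          exact this
      · -- leading window fine: B drops the head; A's array and count are unchanged
        rw [bZip, if_pos hg, if_neg hs]
        have hrl : 1 ≤ rest.length := by omega
        have hsplit : (pre ++ rest.take 1) ++ rest.drop 1 = pre ++ rest := by
          rw [List.append_assoc, List.take_append_drop]
        have hplen : (pre ++ rest.take 1).length = pre.length + 1 := by
          simp [List.length_append, List.length_take]; omega
        have := ih (fa + 1) (pre ++ rest.take 1) (rest.drop 1) removed
          (by rw [hsplit]; exact hfa)
          (by simp; omega)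
          (by
            rw [hsplit, hplen]
            intro t ht htl
            rcases Nat.lt_or_ge t pre.length with h | h
            · exact hcl t h htl
            · have : t = pre.length := by omega
              subst this
              rw [hdw]
              omega)
        rw [hsplit] at this
        exact this
    · -- fewer than k elements left of the zipper: no window anywhere violates
      rw [bZip, if_neg hg, aLoop]
      by_cases hnk : (((pre ++ rest).length : Int) < k)
      · rw [if_pos hnk]
      · rw [if_neg hnk]
        rw [aScan_eq_none k th (pre ++ rest)
          (fun t htl htk => hcl t
            (by rw [List.length_append] at htk; omega) htk)
          (by omega)]

-- ===== VERDICT (by name: the statement is the Claim_ definition above) =====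
theorem reduce_gifts_spec : Claim_equal_reduce_gifts := by
  intro prices k threshold _dom
  unfold Spec_reduce_gifts reduce_gifts reduce_gifts_alt
  by_cases hk : k ≤ 0
  · rw [if_pos hk, if_pos hk]
  · rw [if_neg hk, if_neg hk]
    exact pv_main k threshold (by omega) (prices.length + 1) (prices.length + 1)
      [] prices 0 (by simp) (by omega)
      (fun t ht _ => by simp at ht)
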